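/- GENERATED by farm/mkstatement.py from design/units.tsv (unit `GifMakeMapObject.2`) and the assertions of Gif/Spec/Seg_GifMakeMapObject.lean — do not edit.
   THE STATEMENT of the proof unit `GifMakeMapObject.2`: segment 2 of `GifMakeMapObject` (30 instructions; entries 0x10793b;
   exits 0x1079ac; ranges 0x10793b-0x1079a7)
   takes each of its entry assertions to one of its exit assertions (`Gif.Spec.GifMakeMapObject.Seg2`), given the contracts of its callees.
   What the names mean: ProgX/Base/Spec/Basic.lean (the shared hypotheses), Gif/Spec/Seg_GifMakeMapObject.lean (the assertions). The theorem to prove: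
   `theorem GifMakeMapObject_2_ok : Gif.Spec.GifMakeMapObject_2.Statement`. -/
import Gif.Code
import Gif.Dec.All
import Gif.Labels
import Gif.Spec.Seg_GifMakeMapObject
import ProgX.Base.Spec.Heap
import ProgX.Base.Spec.Libc
namespace Gif.Spec.GifMakeMapObject_2
open X86 X86.User Asan

/-- The statement of unit `GifMakeMapObject.2`. -/
def Statement : Prop :=
  ∀ (Lay : Layout) (_hLay : Lay.hi = 0x1000000) (μ : Microarch) (_hμ : UserX.MicroOK μ) (u₀ : State)
    (_hcode : HasCodeNat Lay u₀ Gif.L.GifMakeMapObject.entry Gif.Code.code_GifMakeMapObject.nat Gif.L.GifMakeMapObject.size)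
    (_h_calloc : ∀ (H : Heap) (rest : List Obj) (frames : List (Nat × FrameLayout)), Calls Lay μ ProgX.Base.WayInv (ProgX.Base.conv u₀) ProgX.Base.L.calloc.entry (ProgX.Base.Spec.calloc.spec H rest frames))
    (_h_memcpy : ∀ (others : List Obj) (frames : List (Nat × FrameLayout)), Calls Lay μ ProgX.Base.WayInv (ProgX.Base.conv u₀) ProgX.Base.L.memcpy.entry (ProgX.Base.Spec.memcpy.spec others frames))
    (_h_free : ∀ (H : Heap) (rest : List Obj) (frames : List (Nat × FrameLayout)) (n : Nat), Calls Lay μ ProgX.Base.WayInv (ProgX.Base.conv u₀) ProgX.Base.L.free.entry (ProgX.Base.Spec.free.spec H rest frames n))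
    (_h_asan_store8_noabort : Asan.SmallCheck Lay μ ProgX.Base.WayInv (ProgX.Base.CodeOK u₀) [.rax, .rcx, .rdx] 8 ProgX.Base.L.__asan_store8_noabort.entry)
    (_h_asan_store4_noabort : Asan.SmallCheck Lay μ ProgX.Base.WayInv (ProgX.Base.CodeOK u₀) [.rax, .rcx, .rdx] 4 ProgX.Base.L.__asan_store4_noabort.entry)
    (_h_asan_store1_noabort : Asan.SmallCheck Lay μ ProgX.Base.WayInv (ProgX.Base.CodeOK u₀) [.rax, .rdx] 1 ProgX.Base.L.__asan_store1_noabort.entry),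
    Gif.Spec.GifMakeMapObject.Seg2 Lay μ u₀

end Gif.Spec.GifMakeMapObject_2
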